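-- pv_equiv track=rewrite | github.com/msheroubi/scripts | get-req.py | mergeTuitionRankingData
-- ===== SOURCE A (Python) =====
-- def mergeTuitionRankingData(tuition_data, ranking_data):
-- 	output = []
-- 	for i in range(0, len(tuition_data)):
-- 		for j in range(0, len(ranking_data)):
-- 			if ranking_data[j][1] == tuition_data[i][0]:
-- 				tuition_data[i].append(ranking_data[j][0])
-- 				output.append(tuition_data[i])
-- 	return output
-- ===== SOURCE B (Python) =====
-- def mergeTuitionRankingData(tuition_data, ranking_data):
--     ranks_by_name = {}
--     for row in ranking_data:
--         ranks_by_name.setdefault(row[1], []).append(row[0])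
--     output = []
--     for t in tuition_data:
--         for rank in ranks_by_name.get(t[0], []):
--             t.append(rank)
--             output.append(t)
--     return output
-- ===== Notes on version B (the rewrite author's own statement) =====
-- stated objective: alternative
-- what changed: B builds a dict index of ranking_data keyed by name (row[1]) once and merges in a single pass over tuition_data, instead of A's nested rescans of ranking_data for every tuition row; Pre_ excludes malformed rows (empty tuition row, ranking row with <2 fields), on which A returns [] only when the other list is empty while B's index/lookup pass reads every row and raises IndexError.
-- outside the precondition, e.g. on mergeTuitionRankingData([], [[]]): A returns [], B raises IndexError; on mergeTuitionRankingData([[]], []): A returns [], B raises IndexError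
import Mathlib
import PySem

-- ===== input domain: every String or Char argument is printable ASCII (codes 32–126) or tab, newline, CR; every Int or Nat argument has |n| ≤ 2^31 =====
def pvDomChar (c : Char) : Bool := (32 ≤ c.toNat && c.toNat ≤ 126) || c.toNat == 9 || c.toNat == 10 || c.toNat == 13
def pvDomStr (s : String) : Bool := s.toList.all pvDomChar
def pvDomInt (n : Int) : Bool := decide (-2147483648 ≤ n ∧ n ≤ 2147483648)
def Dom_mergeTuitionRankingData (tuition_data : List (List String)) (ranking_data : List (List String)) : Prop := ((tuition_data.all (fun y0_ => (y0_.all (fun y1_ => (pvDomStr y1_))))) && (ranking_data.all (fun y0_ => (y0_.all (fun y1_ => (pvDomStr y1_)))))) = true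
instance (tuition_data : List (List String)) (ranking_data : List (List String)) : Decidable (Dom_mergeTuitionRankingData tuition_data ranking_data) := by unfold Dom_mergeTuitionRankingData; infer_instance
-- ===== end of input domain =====

-- B replaces A's nested scan of ranking_data per tuition row by a dict index over ranking_data
-- plus a single pass over tuition_data; the equivalence is about the RETURN value (both Pythons
-- also append the matched ranks to the tuition rows in place, the same observable mutation).

-- ===== PORT A =====
-- Python's output list holds REFERENCES to the (still mutated) tuition rows; the port models
-- this by collecting row indices and resolving them against the final row list at the end.
def pvAState (tuition_data : List (List String)) (ranking_data : List (List String)) :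
    List (List String) × List Int :=
  (PySem.List.pyRange 0 (tuition_data.length : Int) 1).foldl
    (fun (st : List (List String) × List Int) i =>
      (PySem.List.pyRange 0 (ranking_data.length : Int) 1).foldl
        (fun st2 j =>
          if PySem.List.pyGetD (PySem.List.pyGetD ranking_data j []) 1 ""
              = PySem.List.pyGetD (PySem.List.pyGetD st2.1 i []) 0 "" then
            (PySem.List.pySetD st2.1 i
               (PySem.List.pyGetD st2.1 i [] ++ [PySem.List.pyGetD (PySem.List.pyGetD ranking_data j []) 0 ""]),
             st2.2 ++ [i])
          else st2)
        st)
    (tuition_data, ([] : List Int))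

def mergeTuitionRankingData (tuition_data : List (List String)) (ranking_data : List (List String)) : List (List String) :=
  let st := pvAState tuition_data ranking_data
  st.2.map (fun i => PySem.List.pyGetD st.1 i [])

-- ===== PORT B =====
-- B's inner loop 't.append(rank); output.append(t)' appends an ALIAS of the still-growing row t,
-- so at return all entries appended for one row equal its final value; the port models the inner
-- loop's state as (current row value, number of aliased entries appended) and resolves the
-- aliases at the end of that row's loop.
def mergeTuitionRankingData_alt (tuition_data : List (List String)) (ranking_data : List (List String)) : List (List String) :=
  let ranks_by_name := ranking_data.foldl
    (fun (d : PySem.Dict String (List String)) row =>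
      d.modify (PySem.List.pyGetD row 1 "") [] (fun l => l ++ [PySem.List.pyGetD row 0 ""]))
    PySem.Dict.empty
  tuition_data.foldl
    (fun out t =>
      let st := (ranks_by_name.getD (PySem.List.pyGetD t 0 "") []).foldl
        (fun (p : List String × Nat) rank => (p.1 ++ [rank], p.2 + 1)) (t, 0)
      out ++ List.replicate st.2 st.1)
    []

-- ===== PRECONDITION & SPEC =====
-- Pre_ excludes malformed rows (an empty tuition row, a ranking row with fewer than 2 fields):
-- on those A raises IndexError whenever both lists are nonempty, and when the other list is
-- empty A returns [] without ever reading the malformed row while B's single pass reads every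
-- row and raises there.
def Pre_mergeTuitionRankingData (tuition_data : List (List String)) (ranking_data : List (List String)) : Prop :=
  (∀ t ∈ tuition_data, t ≠ []) ∧ (∀ r ∈ ranking_data, 2 ≤ r.length)
instance (tuition_data : List (List String)) (ranking_data : List (List String)) : Decidable (Pre_mergeTuitionRankingData tuition_data ranking_data) := by unfold Pre_mergeTuitionRankingData; infer_instance

def pvWitness_mergeTuitionRankingData : List (List String) × List (List String) :=
  ([["a", "100"], ["b", "200"]], [["1", "a"], ["2", "a"]])

def Spec_mergeTuitionRankingData (tuition_data : List (List String)) (ranking_data : List (List String)) (out : List (List String)) : Prop := out = mergeTuitionRankingData_alt tuition_data ranking_data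
instance (tuition_data : List (List String)) (ranking_data : List (List String)) (out : List (List String)) : Decidable (Spec_mergeTuitionRankingData tuition_data ranking_data out) := by unfold Spec_mergeTuitionRankingData; infer_instance

-- ===== CLAIM (what is proved, stated in full; the proofs are below) =====
def Claim_equal_mergeTuitionRankingData : Prop := ∀ (tuition_data : List (List String)) (ranking_data : List (List String)), Dom_mergeTuitionRankingData tuition_data ranking_data → Pre_mergeTuitionRankingData tuition_data ranking_data → Spec_mergeTuitionRankingData tuition_data ranking_data (mergeTuitionRankingData tuition_data ranking_data)

-- ===== LEMMAS AND PROOFS =====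

-- the rank values attached to a tuition row whose name is k, in ranking order
def pvRanksFor (rd : List (List String)) (k : String) : List String :=
  (rd.filter (fun r => r.getD 1 "" == k)).map (fun r => r.getD 0 "")

theorem pvIndex_getD (rd : List (List String)) (k : String) :
    (rd.foldl (fun (d : PySem.Dict String (List String)) row =>
        d.modify (row.getD 1 "") [] (fun l => l ++ [row.getD 0 ""])) PySem.Dict.empty).getD k []
      = pvRanksFor rd k := by
  have h : rd.foldl (fun (d : PySem.Dict String (List String)) row =>
        d.modify (row.getD 1 "") [] (fun l => l ++ [row.getD 0 ""])) PySem.Dict.empty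
      = (rd.map (fun r => (r.getD 1 "", r.getD 0 ""))).foldl
          (fun d p => d.modify p.1 [] (fun l => l ++ [p.2])) PySem.Dict.empty := by
    rw [List.foldl_map]
  rw [h, PySem.Dict.getD_foldl_modify_append]
  simp only [pvRanksFor, List.filter_map, List.map_map]
  rfl

theorem pvInnerB_spec (ranks : List String) :
    ∀ (t : List String) (n : Nat),
    ranks.foldl (fun (p : List String × Nat) rank => (p.1 ++ [rank], p.2 + 1)) (t, n)
      = (t ++ ranks, n + ranks.length) := by
  induction ranks with
  | nil => intro t n; simp
  | cons r rs ih =>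
      intro t n
      rw [List.foldl_cons, ih]
      simp only [List.append_assoc, List.singleton_append, List.length_cons,
        Prod.mk.injEq, true_and]
      omega

theorem mergeTuitionRankingData_alt_eq (td rd : List (List String)) :
    mergeTuitionRankingData_alt td rd
      = td.flatMap (fun t =>
          List.replicate (pvRanksFor rd (t.getD 0 "")).length (t ++ pvRanksFor rd (t.getD 0 ""))) := by
  unfold mergeTuitionRankingData_alt
  simp only [PySem.List.pyGetD_ofNat']
  have hstep : ∀ (out : List (List String)) (t : List String),
      (let st := ((rd.foldl (fun (d : PySem.Dict String (List String)) row =>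
          d.modify (row.getD 1 "") [] (fun l => l ++ [row.getD 0 ""])) PySem.Dict.empty).getD (t.getD 0 "") []).foldl
          (fun (p : List String × Nat) rank => (p.1 ++ [rank], p.2 + 1)) (t, 0);
       out ++ List.replicate st.2 st.1)
      = out ++ List.replicate (pvRanksFor rd (t.getD 0 "")).length (t ++ pvRanksFor rd (t.getD 0 "")) := by
    intro out t
    simp only [pvIndex_getD, pvInnerB_spec, Nat.zero_add]
  simp only [hstep]
  exact PySem.List.foldl_append_eq_flatMap _ _ _

-- inner loop over rd (already converted from the j-range), for a fixed row index i
def pvInner (i : Nat) (st2 : List (List String) × List Int) (r : List String) :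
    List (List String) × List Int :=
  if r.getD 1 "" = (st2.1.getD i []).getD 0 "" then
    (st2.1.set i (st2.1.getD i [] ++ [r.getD 0 ""]), st2.2 ++ [(i : Int)])
  else st2

theorem pvInner_spec (rd : List (List String)) (i : Nat) :
    ∀ (td : List (List String)) (o : List Int) (t acc : List String),
    i < td.length → td.getD i [] = t ++ acc → t ≠ [] →
    rd.foldl (pvInner i) (td, o)
      = (td.set i (t ++ (acc ++ pvRanksFor rd (t.getD 0 ""))),
         o ++ List.replicate (pvRanksFor rd (t.getD 0 "")).length (i : Int)) := by
  induction rd with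
  | nil =>
      intro td o t acc hi hrow _ht
      simp only [List.foldl_nil, pvRanksFor, List.filter_nil, List.map_nil, List.length_nil,
        List.replicate_zero, List.append_nil]
      rw [← hrow, List.getD_eq_getElem _ _ hi, List.set_getElem_self]
  | cons r rd ih =>
      intro td o t acc hi hrow ht
      have hhead : (td.getD i []).getD 0 "" = t.getD 0 "" := by
        rw [hrow]; cases t with
        | nil => exact absurd rfl ht
        | cons x xs => rfl
      by_cases hm : r.getD 1 "" = t.getD 0 ""
      · have hcons : pvRanksFor (r :: rd) (t.getD 0 "") = r.getD 0 "" :: pvRanksFor rd (t.getD 0 "") := by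
          simp only [pvRanksFor, List.filter_cons, beq_iff_eq, hm, if_pos, List.map_cons]
        rw [List.foldl_cons]
        have hstep : pvInner i (td, o) r
            = (td.set i (t ++ (acc ++ [r.getD 0 ""])), o ++ [(i : Int)]) := by
          unfold pvInner
          rw [hhead, if_pos hm, hrow, List.append_assoc]
        rw [hstep]
        rw [ih (td.set i (t ++ (acc ++ [r.getD 0 ""]))) (o ++ [(i : Int)]) t (acc ++ [r.getD 0 ""])
            (by simpa using hi)
            (by rw [List.getD_eq_getElem _ _ (by simpa using hi)]; simp)
            ht]
        rw [hcons]
        simp [List.set_set, List.replicate_succ]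
      · have hcons : pvRanksFor (r :: rd) (t.getD 0 "") = pvRanksFor rd (t.getD 0 "") := by
          simp only [pvRanksFor, List.filter_cons, beq_iff_eq, hm, ite_false]
        rw [List.foldl_cons]
        have hstep : pvInner i (td, o) r = (td, o) := by
          unfold pvInner
          rw [hhead, if_neg hm]
        rw [hstep, ih td o t acc hi hrow ht, hcons]

def pvMergeRow (rd : List (List String)) (t : List String) : List String :=
  t ++ pvRanksFor rd (t.getD 0 "")

def pvTdUpTo (td rd : List (List String)) (k : Nat) : List (List String) :=
  (td.take k).map (pvMergeRow rd) ++ td.drop k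

def pvOutUpTo (td rd : List (List String)) (k : Nat) : List Int :=
  (List.range k).flatMap
    (fun i => List.replicate (pvRanksFor rd ((td.getD i []).getD 0 "")).length (i : Int))

theorem pvTdUpTo_length (td rd : List (List String)) (k : Nat) (h : k ≤ td.length) :
    (pvTdUpTo td rd k).length = td.length := by
  simp [pvTdUpTo]; omega

theorem pvTdUpTo_getD (td rd : List (List String)) (k : Nat) (h : k < td.length) :
    (pvTdUpTo td rd k).getD k [] = td.getD k [] := by
  have hlen : ((td.take k).map (pvMergeRow rd)).length = k := by simp; omega
  rw [pvTdUpTo, List.getD_eq_getElem _ _ (by simp at *; omega)]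
  rw [List.getElem_append_right (by omega)]
  have hmin : min k td.length = k := by omega
  simp [hmin, List.getElem?_eq_getElem h]

theorem pvOuter_spec (td rd : List (List String)) (h1 : ∀ t ∈ td, t ≠ []) :
    ∀ k, k ≤ td.length →
    (List.range k).foldl (fun st i => rd.foldl (pvInner i) st) (td, ([] : List Int))
      = (pvTdUpTo td rd k, pvOutUpTo td rd k) := by
  intro k
  induction k with
  | zero => intro _; simp [pvTdUpTo, pvOutUpTo]
  | succ k ih =>
      intro hk1
      have hk : k < td.length := by omega
      rw [List.range_succ, List.foldl_append, ih (by omega), List.foldl_cons, List.foldl_nil]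
      have ht : td.getD k [] ≠ [] := by
        rw [List.getD_eq_getElem _ _ hk]
        exact h1 _ (List.getElem_mem hk)
      rw [pvInner_spec rd k _ _ (td.getD k []) []
          (by rw [pvTdUpTo_length _ _ _ (by omega)]; exact hk)
          (by rw [pvTdUpTo_getD _ _ _ hk]; simp) ht]
      simp only [Prod.mk.injEq]
      refine ⟨?_, ?_⟩
      · -- set at k turns pvTdUpTo k into pvTdUpTo (k+1)
        have hlen : ((td.take k).map (pvMergeRow rd)).length = k := by simp; omega
        rw [pvTdUpTo, List.set_append_right _ _ (by omega)]
        rw [List.drop_eq_getElem_cons hk]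
        simp only [hlen, Nat.sub_self, List.set_cons_zero]
        rw [pvTdUpTo, List.take_add_one, List.getElem?_eq_getElem hk]
        simp only [Option.toList_some, List.map_append, List.map_cons, List.map_nil,
          List.append_assoc, List.singleton_append, List.nil_append]
        rw [List.getD_eq_getElem _ _ hk]
        rfl
      · rw [pvOutUpTo, pvOutUpTo, List.range_succ, List.flatMap_append, List.flatMap_cons,
          List.flatMap_nil, List.append_nil]

theorem pvRange_cast (n : Nat) :
    PySem.List.pyRange 0 (n : Int) 1 = (List.range n).map (Nat.cast : Nat → Int) := by
  rw [PySem.List.pyRange_zero_natCast]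

theorem pvFlatMap_range {α β : Type} (l : List α) (d : α) (g : α → List β) :
    (List.range l.length).flatMap (fun i => g (l.getD i d)) = l.flatMap g := by
  induction l with
  | nil => rfl
  | cons x xs ih =>
      simp only [List.length_cons, List.range_succ_eq_map, List.flatMap_cons, List.flatMap_map,
        List.getD_cons_zero, List.getD_cons_succ]
      rw [ih]

theorem pvAState_eq (td rd : List (List String))
    (h1 : ∀ t ∈ td, t ≠ []) :
    pvAState td rd = (pvTdUpTo td rd td.length, pvOutUpTo td rd td.length) := by
  unfold pvAState
  rw [pvRange_cast td.length, List.foldl_map]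
  simp only [PySem.List.pyGetD_natCast, PySem.List.pySetD_natCast, PySem.List.pyGetD_ofNat']
  have houter : ∀ (st : List (List String) × List Int) (k : Nat),
      (PySem.List.pyRange 0 (rd.length : Int) 1).foldl
        (fun st2 j =>
          if (PySem.List.pyGetD rd j []).getD 1 "" = (st2.1.getD k []).getD 0 "" then
            (st2.1.set k ((st2.1.getD k []) ++ [(PySem.List.pyGetD rd j []).getD 0 ""]),
             st2.2 ++ [(k : Int)])
          else st2) st
      = rd.foldl (pvInner k) st := by
    intro st k
    rw [PySem.List.foldl_pyRange_zero_pyGetD' rd []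
      (fun st2 r =>
        if r.getD 1 "" = (st2.1.getD k []).getD 0 "" then
          (st2.1.set k ((st2.1.getD k []) ++ [r.getD 0 ""]), st2.2 ++ [(k : Int)])
        else st2) st]
    rfl
  simp only [houter]
  exact pvOuter_spec td rd h1 td.length (Nat.le_refl _)

theorem mergeTuitionRankingData_eq (td rd : List (List String))
    (h1 : ∀ t ∈ td, t ≠ []) :
    mergeTuitionRankingData td rd
      = td.flatMap (fun t =>
          List.replicate (pvRanksFor rd (t.getD 0 "")).length (t ++ pvRanksFor rd (t.getD 0 ""))) := by
  have htd : pvTdUpTo td rd td.length = td.map (pvMergeRow rd) := by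
    simp [pvTdUpTo]
  unfold mergeTuitionRankingData
  rw [pvAState_eq td rd h1]
  dsimp only
  rw [htd, pvOutUpTo, List.map_flatMap]
  have hcong : ∀ i ∈ List.range td.length,
      (List.replicate (pvRanksFor rd ((td.getD i []).getD 0 "")).length ((i : Nat) : Int)).map
          (fun j => PySem.List.pyGetD (td.map (pvMergeRow rd)) j [])
        = (fun t => List.replicate (pvRanksFor rd (t.getD 0 "")).length
            (t ++ pvRanksFor rd (t.getD 0 ""))) (td.getD i []) := by
    intro i hi
    have hi' : i < td.length := List.mem_range.mp hi
    have hget : (td.map (pvMergeRow rd)).getD i [] = pvMergeRow rd (td.getD i []) := by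
      rw [List.getD_eq_getElem _ _ (by simpa using hi'), List.getElem_map,
        List.getD_eq_getElem _ _ hi']
    rw [List.map_replicate, PySem.List.pyGetD_natCast, hget]
    simp [pvMergeRow]
  rw [List.flatMap_congr hcong]
  exact pvFlatMap_range td []
    (fun t => List.replicate (pvRanksFor rd (t.getD 0 "")).length (t ++ pvRanksFor rd (t.getD 0 "")))

-- ===== VERDICT (by name: the statement is the Claim_ definition above) =====
theorem mergeTuitionRankingData_spec : Claim_equal_mergeTuitionRankingData := by
  intro td rd _hDom hPre
  unfold Spec_mergeTuitionRankingData
  rw [mergeTuitionRankingData_eq td rd hPre.1, mergeTuitionRankingData_alt_eq]
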